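-- pv_equiv track=rewrite | github.com/Mayurgaike/MedAnalyzer | backend/nlp/ner.py | _map_entity_group
-- ===== SOURCE A (Python) =====
-- ENTITY_MAP = {
--     "Disease_disorder": "diagnoses",
--     "Sign_symptom": "symptoms",
--     "Medication": "drugs",
--     "Drug": "drugs",
--     "Chemical": "drugs",
--     "Therapeutic_procedure": "procedures",
--     "Diagnostic_procedure": "procedures",
--     "Lab_value": "lab_values",
--     "Biological_structure": "anatomy",
--     # d4data model outputs
--     "B-Disease": "diagnoses",
--     "I-Disease": "diagnoses",
--     "B-Chemical": "drugs",
--     "I-Chemical": "drugs",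
--     "B-Gene": "genes",
--     "I-Gene": "genes",
--     "B-Species": "species",
--     "I-Species": "species",
--     "DISEASE": "diagnoses",
--     "CHEMICAL": "drugs",
-- }
--
-- def _map_entity_group(group: str) -> str | None:
--     """Map a model entity group to our category. Returns None if unmapped."""
--     # Direct match
--     if group in ENTITY_MAP:
--         return ENTITY_MAP[group]
--
--     # Partial match (handles B-, I- prefixes)
--     group_clean = group.replace("B-", "").replace("I-", "").strip()
--     for key, value in ENTITY_MAP.items():
--         clean_key = key.replace("B-", "").replace("I-", "").strip()
--         if clean_key.lower() == group_clean.lower():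
--             return value
--
--     # Try case-insensitive
--     for key, value in ENTITY_MAP.items():
--         if key.lower() == group.lower():
--             return value
--
--     return None
-- ===== SOURCE B (Python) =====
-- ENTITY_MAP = {
--     "Disease_disorder": "diagnoses",
--     "Sign_symptom": "symptoms",
--     "Medication": "drugs",
--     "Drug": "drugs",
--     "Chemical": "drugs",
--     "Therapeutic_procedure": "procedures",
--     "Diagnostic_procedure": "procedures",
--     "Lab_value": "lab_values",
--     "Biological_structure": "anatomy",
--     # d4data model outputs
--     "B-Disease": "diagnoses",
--     "I-Disease": "diagnoses",
--     "B-Chemical": "drugs",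
--     "I-Chemical": "drugs",
--     "B-Gene": "genes",
--     "I-Gene": "genes",
--     "B-Species": "species",
--     "I-Species": "species",
--     "DISEASE": "diagnoses",
--     "CHEMICAL": "drugs",
-- }
--
--
-- def _map_entity_group(group: str) -> str | None:
--     """Map a model entity group to our category. Returns None if unmapped.
--
--     Single pass: each key gets a match rank (0 exact, 1 prefix-cleaned
--     case-insensitive, 2 case-insensitive); keep the value of the key with the
--     lexicographically smallest (rank, position)."""
--     gclean = group.replace("B-", "").replace("I-", "").strip().lower()
--     glower = group.lower()
--     best_rank, best_val = 3, None
--     for key, value in ENTITY_MAP.items():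
--         if key == group:
--             rank = 0
--         elif key.replace("B-", "").replace("I-", "").strip().lower() == gclean:
--             rank = 1
--         elif key.lower() == glower:
--             rank = 2
--         else:
--             continue
--         if rank < best_rank:
--             best_rank, best_val = rank, value
--     return best_val
-- ===== Notes on version B (the rewrite author's own statement) =====
-- stated objective: alternative
-- what changed: Replaces A's three staged passes (exact dict membership, then a clean-key scan, then a lowercase scan) with a single pass over ENTITY_MAP that assigns every key a match rank (0 exact, 1 prefix-cleaned case-insensitive, 2 case-insensitive) and keeps the value of the lexicographically smallest (rank, position); the query string is normalized once up front instead of re-lowercased on every key comparison as in A's loops.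
import Mathlib
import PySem

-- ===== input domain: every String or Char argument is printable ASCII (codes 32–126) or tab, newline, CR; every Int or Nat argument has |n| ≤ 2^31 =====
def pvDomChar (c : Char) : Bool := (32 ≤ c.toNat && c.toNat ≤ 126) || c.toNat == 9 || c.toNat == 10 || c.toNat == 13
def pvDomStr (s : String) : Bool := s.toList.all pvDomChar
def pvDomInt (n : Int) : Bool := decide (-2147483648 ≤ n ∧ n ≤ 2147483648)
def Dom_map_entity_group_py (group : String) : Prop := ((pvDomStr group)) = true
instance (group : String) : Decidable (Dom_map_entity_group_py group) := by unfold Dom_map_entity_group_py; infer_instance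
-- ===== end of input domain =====

-- B replaces A's three staged passes (exact lookup, clean-key scan, lowercase scan) by ONE pass
-- that ranks every key (0 exact / 1 cleaned / 2 lowercase) and keeps the best (rank, position).

-- shared module constant ENTITY_MAP (insertion order of the Python dict literal)
def entityMap : List (String × String) :=
  [("Disease_disorder", "diagnoses"), ("Sign_symptom", "symptoms"), ("Medication", "drugs"),
   ("Drug", "drugs"), ("Chemical", "drugs"), ("Therapeutic_procedure", "procedures"),
   ("Diagnostic_procedure", "procedures"), ("Lab_value", "lab_values"),
   ("Biological_structure", "anatomy"), ("B-Disease", "diagnoses"), ("I-Disease", "diagnoses"),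
   ("B-Chemical", "drugs"), ("I-Chemical", "drugs"), ("B-Gene", "genes"), ("I-Gene", "genes"),
   ("B-Species", "species"), ("I-Species", "species"), ("DISEASE", "diagnoses"),
   ("CHEMICAL", "drugs")]

-- ===== PORT A =====
-- s.replace("B-", "").replace("I-", "").strip()
def cleanA (s : String) : String :=
  PySem.Str.strip (PySem.Str.replace (PySem.Str.replace s "B-" "") "I-" "")

-- first loop over ENTITY_MAP.items(): clean_key.lower() == group_clean.lower()
def loopClean : List (String × String) → String → Option String
  | [], _ => none
  | (k, v) :: rest, gclean =>
      if PySem.Str.lower (cleanA k) == PySem.Str.lower gclean then some v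
      else loopClean rest gclean

-- second loop over ENTITY_MAP.items(): key.lower() == group.lower()
def loopLower : List (String × String) → String → Option String
  | [], _ => none
  | (k, v) :: rest, g =>
      if PySem.Str.lower k == PySem.Str.lower g then some v
      else loopLower rest g

def map_entity_group_py (group : String) : Option String :=
  match (PySem.Dict.ofList entityMap).get? group with
  | some v => some v
  | none =>
      let groupClean := cleanA group
      match loopClean entityMap groupClean with
      | some v => some v
      | none => loopLower entityMap group

-- ===== PORT B =====
-- key.replace("B-", "").replace("I-", "").strip().lower()
def normB (s : String) : String :=
  PySem.Str.lower (PySem.Str.strip (PySem.Str.replace (PySem.Str.replace s "B-" "") "I-" ""))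

-- the rank of one key against the precomputed gclean/glower (3 = Python's 'continue')
def rankB (g gclean glower k : String) : Nat :=
  if k == g then 0
  else if normB k == gclean then 1
  else if PySem.Str.lower k == glower then 2
  else 3

-- the single for-loop: keep (best_rank, best_val), updating on strict improvement
def bestLoop (g gclean glower : String) : List (String × String) → Nat × Option String → Nat × Option String
  | [], acc => acc
  | (k, v) :: rest, acc =>
      bestLoop g gclean glower rest
        (if rankB g gclean glower k < acc.1 then (rankB g gclean glower k, some v) else acc)

def map_entity_group_py_alt (group : String) : Option String :=
  (bestLoop group (normB group) (PySem.Str.lower group) entityMap (3, none)).2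

-- ===== PRECONDITION & SPEC =====
def Spec_map_entity_group_py (group : String) (out : Option String) : Prop := out = map_entity_group_py_alt group
instance (group : String) (out : Option String) : Decidable (Spec_map_entity_group_py group out) := by unfold Spec_map_entity_group_py; infer_instance

-- ===== CLAIM (what is proved, stated in full; the proofs are below) =====
def Claim_equal_map_entity_group_py : Prop := ∀ (group : String), Dom_map_entity_group_py group → Spec_map_entity_group_py group (map_entity_group_py group)

-- ===== LEMMAS AND PROOFS =====

lemma find?_congr_mem {α : Type} (p q : α → Bool) (l : List α)
    (h : ∀ x ∈ l, p x = q x) : l.find? p = l.find? q := by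
  induction l with
  | nil => rfl
  | cons a rest ih =>
      have ha := h a (by simp)
      by_cases hp : p a = true
      · rw [List.find?_cons_of_pos hp, List.find?_cons_of_pos (ha ▸ hp)]
      · rw [List.find?_cons_of_neg (by simpa using hp),
            List.find?_cons_of_neg (by simp [← ha]; simpa using hp)]
        exact ih (fun x hx => h x (by simp [hx]))

-- rank characterizations
lemma rank0_iff (g c w k : String) : (rankB g c w k == 0) = (k == g) := by
  unfold rankB
  by_cases h1 : (k == g) = true <;> by_cases h2 : (normB k == c) = true <;>
    by_cases h3 : (PySem.Str.lower k == w) = true <;> simp [h1, h2, h3]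

lemma rank1_iff (g c w k : String) (hk : (k == g) = false) :
    (rankB g c w k == 1) = (normB k == c) := by
  unfold rankB
  by_cases h2 : (normB k == c) = true <;>
    by_cases h3 : (PySem.Str.lower k == w) = true <;> simp [hk, h2, h3]

lemma rank2_iff (g c w k : String) (hk : (k == g) = false) (hc : (normB k == c) = false) :
    (rankB g c w k == 2) = (PySem.Str.lower k == w) := by
  unfold rankB
  by_cases h3 : (PySem.Str.lower k == w) = true <;> simp [hk, hc, h3]

-- the loop cannot improve on rank 0
lemma bestLoop_zero (g c w : String) (l : List (String × String)) (x : Option String) :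
    bestLoop g c w l (0, x) = (0, x) := by
  induction l with
  | nil => rfl
  | cons p rest ih => obtain ⟨k, v⟩ := p; simp [bestLoop, ih]

-- from rank 1, only the first rank-0 key can improve
lemma bestLoop_one (g c w : String) (l : List (String × String)) (x : Option String) :
    bestLoop g c w l (1, x) =
      match l.find? (fun p => rankB g c w p.1 == 0) with
      | some p => (0, some p.2)
      | none => (1, x) := by
  induction l generalizing x with
  | nil => rfl
  | cons p rest ih =>
      obtain ⟨k, v⟩ := p
      by_cases h : rankB g c w k = 0
      · rw [List.find?_cons_of_pos (by simp [h])]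
        simp [bestLoop, h, bestLoop_zero]
      · have h1 : ¬ rankB g c w k < 1 := by omega
        rw [List.find?_cons_of_neg (by simp [h])]
        simp [bestLoop, h1, ih]

-- from rank 2, the result is the first rank-0 key, else the first rank-1 key
lemma bestLoop_two (g c w : String) (l : List (String × String)) (x : Option String) :
    bestLoop g c w l (2, x) =
      match l.find? (fun p => rankB g c w p.1 == 0) with
      | some p => (0, some p.2)
      | none =>
          match l.find? (fun p => rankB g c w p.1 == 1) with
          | some p => (1, some p.2)
          | none => (2, x) := by
  induction l generalizing x with
  | nil => rfl
  | cons p rest ih =>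
      obtain ⟨k, v⟩ := p
      by_cases h0 : rankB g c w k = 0
      · rw [List.find?_cons_of_pos (by simp [h0])]
        simp [bestLoop, h0, bestLoop_zero]
      · rw [List.find?_cons_of_neg (by simp [h0])]
        by_cases h1 : rankB g c w k = 1
        · rw [List.find?_cons_of_pos (by simp [h1])]
          simp [bestLoop, h1, bestLoop_one]
        · have h2 : ¬ rankB g c w k < 2 := by omega
          rw [List.find?_cons_of_neg (by simp [h1])]
          simp [bestLoop, h2, ih]

-- the full loop from the initial (3, None)
lemma bestLoop_three (g c w : String) (l : List (String × String)) (x : Option String) :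
    bestLoop g c w l (3, x) =
      match l.find? (fun p => rankB g c w p.1 == 0) with
      | some p => (0, some p.2)
      | none =>
          match l.find? (fun p => rankB g c w p.1 == 1) with
          | some p => (1, some p.2)
          | none =>
              match l.find? (fun p => rankB g c w p.1 == 2) with
              | some p => (2, some p.2)
              | none => (3, x) := by
  induction l generalizing x with
  | nil => rfl
  | cons p rest ih =>
      obtain ⟨k, v⟩ := p
      by_cases h0 : rankB g c w k = 0
      · rw [List.find?_cons_of_pos (by simp [h0])]
        simp [bestLoop, h0, bestLoop_zero]
      · rw [List.find?_cons_of_neg (by simp [h0])]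
        by_cases h1 : rankB g c w k = 1
        · rw [List.find?_cons_of_pos (by simp [h1])]
          simp [bestLoop, h1, bestLoop_one]
        · rw [List.find?_cons_of_neg (by simp [h1])]
          by_cases h2 : rankB g c w k = 2
          · rw [List.find?_cons_of_pos (by simp [h2])]
            simp [bestLoop, h2, bestLoop_two]
          · have h3 : ¬ rankB g c w k < 3 := by omega
            rw [List.find?_cons_of_neg (by simp [h2])]
            simp [bestLoop, h3, ih]

-- A-side: each construct as a first-match scan
lemma ofList_entityMap : PySem.Dict.ofList entityMap = PySem.Dict.mk entityMap := by decide

lemma get?_mk_find (l : List (String × String)) (g : String) :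
    (PySem.Dict.mk l).get? g = (l.find? (fun p => p.1 == g)).map (·.2) := by
  induction l with
  | nil => simp [PySem.Dict.get?]
  | cons p rest ih =>
      obtain ⟨k, v⟩ := p
      rw [PySem.Dict.get?_mk_cons]
      by_cases h : (k == g) = true
      · rw [List.find?_cons_of_pos (by simpa using h)]; simp [h]
      · rw [List.find?_cons_of_neg (by simpa using h)]
        simp [h, ih]

lemma normB_eq (s : String) : normB s = PySem.Str.lower (cleanA s) := rfl

lemma loopClean_find (l : List (String × String)) (gc : String) :
    loopClean l gc = (l.find? (fun p => normB p.1 == PySem.Str.lower gc)).map (·.2) := by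
  simp only [normB_eq]
  induction l with
  | nil => rfl
  | cons p rest ih =>
      obtain ⟨k, v⟩ := p
      cases hb : (PySem.Str.lower (cleanA k) == PySem.Str.lower gc) with
      | true =>
          rw [List.find?_cons_of_pos (by simpa using hb)]
          simp [loopClean, hb]
      | false =>
          rw [List.find?_cons_of_neg (by simp [hb])]
          simp [loopClean, hb, ih]

lemma loopLower_find (l : List (String × String)) (g : String) :
    loopLower l g = (l.find? (fun p => PySem.Str.lower p.1 == PySem.Str.lower g)).map (·.2) := by
  induction l with
  | nil => rfl
  | cons p rest ih =>
      obtain ⟨k, v⟩ := p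
      by_cases h : (PySem.Str.lower k == PySem.Str.lower g) = true
      · rw [List.find?_cons_of_pos (by simpa using h)]; simp [loopLower, h]
      · rw [List.find?_cons_of_neg (by simpa using h)]; simp [loopLower, h, ih]

-- ===== VERDICT (by name: the statement is the Claim_ definition above) =====
theorem map_entity_group_py_spec : Claim_equal_map_entity_group_py := by
  intro group _
  unfold Spec_map_entity_group_py map_entity_group_py map_entity_group_py_alt
  rw [ofList_entityMap, get?_mk_find, bestLoop_three]
  have e0 : (fun p : String × String => rankB group (normB group) (PySem.Str.lower group) p.1 == 0)
      = (fun p : String × String => p.1 == group) := by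
    funext p; exact rank0_iff _ _ _ _
  rw [e0]
  cases hf0 : entityMap.find? (fun p => p.1 == group) with
  | some p => rfl
  | none =>
      have hmem0 : ∀ p ∈ entityMap, (p.1 == group) = false := by
        intro p hp
        simpa using List.find?_eq_none.mp hf0 p hp
      have e1 : entityMap.find?
            (fun p => rankB group (normB group) (PySem.Str.lower group) p.1 == 1)
          = entityMap.find? (fun p => normB p.1 == PySem.Str.lower (cleanA group)) := by
        apply find?_congr_mem
        intro p hp
        rw [(normB_eq group).symm]
        exact rank1_iff _ _ _ _ (hmem0 p hp)
      simp only [Option.map_none, loopClean_find, loopLower_find]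
      rw [e1]
      cases hf1 : entityMap.find? (fun p => normB p.1 == PySem.Str.lower (cleanA group)) with
      | some p => rfl
      | none =>
          have hmem1 : ∀ p ∈ entityMap, (normB p.1 == PySem.Str.lower (cleanA group)) = false := by
            intro p hp
            simpa using List.find?_eq_none.mp hf1 p hp
          have e2 : entityMap.find?
                (fun p => rankB group (normB group) (PySem.Str.lower group) p.1 == 2)
              = entityMap.find? (fun p => PySem.Str.lower p.1 == PySem.Str.lower group) := by
            apply find?_congr_mem
            intro p hp
            refine rank2_iff _ _ _ _ (hmem0 p hp) ?_
            rw [normB_eq group]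
            exact hmem1 p hp
          rw [e2]
          cases hf2 : entityMap.find? (fun p => PySem.Str.lower p.1 == PySem.Str.lower group) with
          | some p => rfl
          | none => rfl
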